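-- pv_equiv track=rewrite | github.com/AKranz-dev/LeetCode | Accepted/CountDistinctNumbersonBoard.py | distinctIntegers
-- ===== SOURCE A (Python) =====
-- def distinctIntegers(n: int) -> int:
--
--     tempBoard = []
--     board = []
--     numList = []
--     board.append(n)
--     tempBoard.append(n)
--
--
--     while len(board) >=1:
--         for num in board:
--             for i in range(1,num):
--                 if num % i == 1:
--                     board.append(i)
--                     tempBoard.append(i)
--             board.remove(num)
--
--
--     for num in tempBoard:
--         if num not in numList:
--             numList.append(num)
--     return len(numList)
-- ===== SOURCE B (Python) =====
-- def distinctIntegers(n: int) -> int: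
--     # Closed form: the board eventually holds exactly {n} ∪ {2,...,n-1},
--     # i.e. n-1 distinct values for n >= 2, and just {n} otherwise.
--     return max(1, n - 1)
-- ===== Notes on version B (the rewrite author's own statement) =====
-- stated objective: faster
-- what changed: Replaces the whole board simulation (repeated divisor scans, list.remove, membership dedup) by the closed form max(1, n-1), proved equal via an invariant on the set of values ever placed on the board.
import Mathlib
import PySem

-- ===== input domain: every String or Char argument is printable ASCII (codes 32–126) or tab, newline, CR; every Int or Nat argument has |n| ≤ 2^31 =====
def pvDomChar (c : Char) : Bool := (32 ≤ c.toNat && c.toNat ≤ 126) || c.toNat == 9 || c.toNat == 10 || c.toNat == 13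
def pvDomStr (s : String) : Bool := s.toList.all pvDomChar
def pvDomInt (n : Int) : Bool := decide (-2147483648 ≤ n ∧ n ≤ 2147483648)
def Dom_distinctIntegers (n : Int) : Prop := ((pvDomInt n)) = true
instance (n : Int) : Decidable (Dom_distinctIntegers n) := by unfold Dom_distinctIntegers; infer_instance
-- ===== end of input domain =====

-- B replaces A's whole board simulation by the closed form max(1, n-1) (O(1)).


-- ===== PORT A =====
-- Termination measure for A's loops: sum of 2^v over the board.
def pvM (l : List Int) : Nat := (l.map (fun v => 2 ^ v.toNat)).sum

-- the values appended while processing num: [i for i in range(1, num) if num % i == 1]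
def pvDivs (num : Int) : List Int :=
  (PySem.List.pyRange 1 num 1).filter (fun i => PySem.Int.mod num i == 1)

theorem pvM_append (l d : List Int) : pvM (l ++ d) = pvM l + pvM d := by
  simp [pvM]

theorem pvM_erase (l : List Int) (a : Int) (h : a ∈ l) :
    pvM (l.erase a) + 2 ^ a.toNat = pvM l := by
  induction l with
  | nil => cases h
  | cons hd tl ih =>
    by_cases hha : hd = a
    · subst hha; rw [List.erase_cons_head]; simp [pvM]; ring
    · rw [List.erase_cons_tail (by simpa using hha)]
      have ha : a ∈ tl := by
        cases List.mem_cons.mp h with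
        | inl h' => exact absurd h'.symm hha
        | inr h' => exact h'
      have := ih ha
      simp only [pvM, List.map_cons, List.sum_cons] at this ⊢
      omega

theorem pvM_pyRange (m : Nat) : ∀ a : Int, 1 ≤ a →
    pvM (PySem.List.pyRange a (a + m) 1) + 2 ^ a.toNat ≤ 2 ^ (a + m).toNat := by
  induction m with
  | zero =>
    intro a _
    rw [PySem.List.pyRange_one_eq_nil (by omega)]
    simp [pvM]
  | succ k ih =>
    intro a ha
    rw [PySem.List.pyRange_one_cons (by omega)]
    have h1 : a + 1 + (k : Int) = a + (k + 1 : Nat) := by push_cast; ring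
    have h2 := ih (a + 1) (by omega)
    rw [h1] at h2
    have h3 : (a + 1).toNat = a.toNat + 1 := by omega
    simp only [pvM, List.map_cons, List.sum_cons] at h2 ⊢
    rw [h3] at h2
    have : 2 ^ (a.toNat + 1) = 2 ^ a.toNat + 2 ^ a.toNat := by ring
    omega

theorem pvM_divs_lt (num : Int) : pvM (pvDivs num) < 2 ^ num.toNat := by
  have hsub : (pvDivs num).Sublist (PySem.List.pyRange 1 num 1) := by
    unfold pvDivs; exact List.filter_sublist
  have hle : pvM (pvDivs num) ≤ pvM (PySem.List.pyRange 1 num 1) := by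
    unfold pvM
    exact List.Sublist.sum_le_sum (hsub.map _) (by intro x _; positivity)
  have hpos : 0 < 2 ^ num.toNat := by positivity
  by_cases hn : num ≤ 1
  · have h0 : pvM (PySem.List.pyRange 1 num 1) = 0 := by
      rw [PySem.List.pyRange_one_eq_nil (by omega)]; simp [pvM]
    omega
  · have hm : (1 : Int) + ((num - 1).toNat : Int) = num := by omega
    have hb := pvM_pyRange (num - 1).toNat 1 le_rfl
    rw [hm] at hb
    have h1 : (1 : Int).toNat = 1 := rfl
    rw [h1] at hb
    omega

theorem pvStep_lt (board : List Int) (num : Int) (h : num ∈ board) :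
    pvM ((board ++ pvDivs num).erase num) < pvM board := by
  have hmem : num ∈ board ++ pvDivs num := List.mem_append_left _ h
  have he := pvM_erase _ _ hmem
  rw [pvM_append] at he
  have := pvM_divs_lt num
  omega

-- the inner "for num in board" pass: CPython iterates by index over the mutating list;
-- appends go to the end, board.remove(num) removes the first occurrence (always present,
-- so the ValueError branch of remove is unreachable and List.erase is exact here).
-- tempBoard is threaded back-to-front (cons-side accumulator for Python's O(1)
-- list.append) and reversed once at the end of distinctIntegers.
def pvForPass (i : Nat) (board tempRev : List Int) : List Int × List Int :=
  if h : i < board.length then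
    let num := board[i]
    let d := pvDivs num
    pvForPass (i + 1) ((board ++ d).erase num) (d.reverse ++ tempRev)
  else (board, tempRev)
termination_by pvM board
decreasing_by exact pvStep_lt board _ (board.getElem_mem h)

theorem pvForPass_M_le (i : Nat) (board temp : List Int) :
    pvM (pvForPass i board temp).1 ≤ pvM board := by
  induction i, board, temp using pvForPass.induct with
  | case1 i board temp h num d ih =>
    rw [pvForPass, dif_pos h]
    exact le_trans ih (le_of_lt (pvStep_lt board _ (board.getElem_mem h)))
  | case2 i board temp h =>
    rw [pvForPass, dif_neg h]

theorem pvForPass_M_lt (board temp : List Int) (h : 0 < board.length) :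
    pvM (pvForPass 0 board temp).1 < pvM board := by
  rw [pvForPass, dif_pos h]
  exact lt_of_le_of_lt (pvForPass_M_le _ _ _)
    (pvStep_lt board _ (board.getElem_mem h))

-- the outer "while len(board) >= 1" loop; returns the final tempBoard
def pvWhile (board tempRev : List Int) : List Int :=
  if h : 1 ≤ board.length then
    let r := pvForPass 0 board tempRev
    pvWhile r.1 r.2
  else tempRev
termination_by pvM board
decreasing_by exact pvForPass_M_lt board tempRev h

def distinctIntegers (n : Int) : Int :=
  let tempBoard := (pvWhile [n] [n]).reverse
  let numList := tempBoard.foldl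
    (fun acc num => if num ∈ acc then acc else acc ++ [num]) []
  (numList.length : Int)

-- ===== PORT B =====
def distinctIntegers_alt (n : Int) : Int := max 1 (n - 1)

-- ===== PRECONDITION & SPEC =====
def Spec_distinctIntegers (n : Int) (out : Int) : Prop := out = distinctIntegers_alt n
instance (n : Int) (out : Int) : Decidable (Spec_distinctIntegers n out) := by unfold Spec_distinctIntegers; infer_instance

-- ===== CLAIM (what is proved, stated in full; the proofs are below) =====
def Claim_equal_distinctIntegers : Prop := ∀ (n : Int), Dom_distinctIntegers n → Spec_distinctIntegers n (distinctIntegers n)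

-- ===== LEMMAS AND PROOFS =====

-- pvR m: the set of values that processing m can ever contribute = {2, …, m-1}
def pvR (m : Int) : Finset Int := (PySem.List.pyRange 2 m 1).toFinset

theorem mem_pvR {x m : Int} : x ∈ pvR m ↔ 2 ≤ x ∧ x < m := by
  simp [pvR, PySem.List.mem_pyRange_one]

-- union of pvR over a list
def pvU (l : List Int) : Finset Int := l.foldr (fun m acc => pvR m ∪ acc) ∅

theorem mem_pvU {x : Int} {l : List Int} : x ∈ pvU l ↔ ∃ m ∈ l, x ∈ pvR m := by
  induction l with
  | nil => simp [pvU]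
  | cons hd tl ih =>
    show x ∈ pvR hd ∪ pvU tl ↔ _
    rw [Finset.mem_union, ih]
    constructor
    · rintro (h | ⟨m, hm, hx⟩)
      · exact ⟨hd, by simp, h⟩
      · exact ⟨m, List.mem_cons_of_mem _ hm, hx⟩
    · rintro ⟨m, hm, hx⟩
      rcases List.mem_cons.mp hm with h | h
      · exact Or.inl (h ▸ hx)
      · exact Or.inr ⟨m, h, hx⟩

theorem mem_pvDivs {x num : Int} :
    x ∈ pvDivs num ↔ (1 ≤ x ∧ x < num) ∧ PySem.Int.mod num x = 1 := by
  simp [pvDivs, List.mem_filter, PySem.List.mem_pyRange_one]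

theorem pvDivs_bounds {x num : Int} (h : x ∈ pvDivs num) : 2 ≤ x ∧ x < num := by
  rw [mem_pvDivs] at h
  obtain ⟨⟨h1, h2⟩, hm⟩ := h
  refine ⟨?_, h2⟩
  by_contra hx
  have hx1 : x = 1 := by omega
  subst hx1
  rw [PySem.Int.mod_eq_emod_of_pos (by omega)] at hm
  simp at hm

theorem sub_one_mem_pvDivs {num : Int} (h : 3 ≤ num) : num - 1 ∈ pvDivs num := by
  rw [mem_pvDivs]
  refine ⟨⟨by omega, by omega⟩, ?_⟩
  rw [PySem.Int.mod_eq_emod_of_pos (by omega)]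
  have hnum : num = 1 + (num - 1) * 1 := by ring
  calc num % (num - 1) = (1 + (num - 1) * 1) % (num - 1) := by rw [← hnum]
    _ = 1 % (num - 1) := by rw [Int.add_mul_emod_self_left]
    _ = 1 := Int.emod_eq_of_lt (by omega) (by omega)

-- key arithmetic fact: what processing num contributes, together with what its
-- children contribute, is exactly pvR num = [2, num-1]
theorem pvR_eq (num : Int) : pvR num = (pvDivs num).toFinset ∪ pvU (pvDivs num) := by
  ext x
  simp only [Finset.mem_union, List.mem_toFinset, mem_pvU, mem_pvR]
  constructor
  · rintro ⟨h2, h1⟩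
    have h3 : 3 ≤ num := by omega
    by_cases hx : x = num - 1
    · exact Or.inl (hx ▸ sub_one_mem_pvDivs h3)
    · exact Or.inr ⟨num - 1, sub_one_mem_pvDivs h3, by omega⟩
  · rintro (h | ⟨m, hm, hx⟩)
    · exact pvDivs_bounds h
    · have h1 := pvDivs_bounds hm
      -- hx is already the unfolded membership
      omega

-- the invariant: tempBoard's elements together with the potential of board is preserved
theorem pvForPass_inv (i : Nat) (board temp : List Int) :
    (pvForPass i board temp).2.toFinset ∪ pvU (pvForPass i board temp).1
      = temp.toFinset ∪ pvU board := by
  induction i, board, temp using pvForPass.induct with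
  | case2 i board temp h => rw [pvForPass, dif_neg h]
  | case1 i board temp h num d ih =>
    rw [pvForPass, dif_pos h]
    rw [ih]
    have hnum : num ∈ board := board.getElem_mem h
    ext x
    simp only [Finset.mem_union, List.toFinset_append, List.mem_toFinset, mem_pvU]
    constructor
    · rintro ((hx | hx) | ⟨m, hm, hx⟩)
      · refine Or.inr ⟨num, hnum, ?_⟩
        rw [pvR_eq]
        exact Finset.mem_union_left _ (List.mem_toFinset.mpr (List.mem_reverse.mp hx))
      · exact Or.inl hx
      · have hm' : m ∈ board ++ pvDivs num := (board ++ pvDivs num).erase_subset hm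
        rcases List.mem_append.mp hm' with hmb | hmd
        · exact Or.inr ⟨m, hmb, hx⟩
        · refine Or.inr ⟨num, hnum, ?_⟩
          rw [pvR_eq]
          exact Finset.mem_union_right _ (mem_pvU.mpr ⟨m, hmd, hx⟩)
    · rintro (hx | ⟨m, hm, hx⟩)
      · exact Or.inl (Or.inr hx)
      · by_cases hmb : m ∈ (board ++ pvDivs num).erase num
        · exact Or.inr ⟨m, hmb, hx⟩
        · have hmn : m = num := by
            by_contra hne
            exact hmb ((List.mem_erase_of_ne hne).mpr (List.mem_append_left _ hm))
          rw [hmn] at hx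
          rw [pvR_eq] at hx
          rcases Finset.mem_union.mp hx with hd | hd
          · exact Or.inl (Or.inl (List.mem_reverse.mpr (List.mem_toFinset.mp hd)))
          · obtain ⟨e, he, hxe⟩ := mem_pvU.mp hd
            have hemem : e ∈ (board ++ pvDivs num).erase num :=
              (List.mem_erase_of_ne (by have := pvDivs_bounds he; omega)).mpr
                (List.mem_append_right _ he)
            exact Or.inr ⟨e, hemem, hxe⟩

theorem pvWhile_toFinset (board temp : List Int) :
    (pvWhile board temp).toFinset = temp.toFinset ∪ pvU board := by
  induction board, temp using pvWhile.induct with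
  | case1 board temp h r ih =>
    rw [pvWhile, dif_pos h]
    exact ih.trans (pvForPass_inv 0 board temp)
  | case2 board temp h =>
    rw [pvWhile, dif_neg h]
    have hb : board = [] := by
      cases board with
      | nil => rfl
      | cons a l => simp at h
    subst hb
    simp [pvU]

-- A's final dedup pass counts the distinct elements
theorem dedup_fold (l : List Int) : ∀ acc : List Int, acc.Nodup →
    (l.foldl (fun acc num => if num ∈ acc then acc else acc ++ [num]) acc).Nodup ∧
    (l.foldl (fun acc num => if num ∈ acc then acc else acc ++ [num]) acc).toFinset
      = acc.toFinset ∪ l.toFinset := by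
  induction l with
  | nil => intro acc h; simpa using h
  | cons hd tl ih =>
    intro acc hacc
    simp only [List.foldl_cons]
    by_cases hmem : hd ∈ acc
    · rw [if_pos hmem]
      obtain ⟨h1, h2⟩ := ih acc hacc
      refine ⟨h1, h2.trans ?_⟩
      ext x
      simp only [Finset.mem_union, List.mem_toFinset, List.toFinset_cons,
        Finset.mem_insert]
      constructor
      · tauto
      · rintro (hx | hx | hx)
        · exact Or.inl hx
        · exact Or.inl (hx ▸ hmem)
        · exact Or.inr hx
    · rw [if_neg hmem]
      have hnodup : (acc ++ [hd]).Nodup := by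
        rw [List.nodup_append]
        exact ⟨hacc, List.nodup_singleton _, by intro a ha b hb hab; rw [List.mem_singleton] at hb; exact hmem ((hab.trans hb) ▸ ha)⟩
      obtain ⟨h1, h2⟩ := ih (acc ++ [hd]) hnodup
      refine ⟨h1, h2.trans ?_⟩
      ext x
      simp only [Finset.mem_union, List.mem_toFinset, List.toFinset_cons,
        Finset.mem_insert, List.toFinset_append, List.toFinset_cons,
        List.toFinset_nil,]
      tauto

theorem pvR_eq_Icc (n : Int) : pvR n = Finset.Icc 2 (n - 1) := by
  ext x
  rw [mem_pvR, Finset.mem_Icc]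
  omega

theorem distinctIntegers_closed (n : Int) : distinctIntegers n = max 1 (n - 1) := by
  unfold distinctIntegers
  obtain ⟨hnd, hfs⟩ := dedup_fold ((pvWhile [n] [n]).reverse) [] List.nodup_nil
  have hlen : (List.foldl (fun acc num => if num ∈ acc then acc else acc ++ [num]) []
      ((pvWhile [n] [n]).reverse)).length
      = (insert n (pvR n)).card := by
    rw [← List.toFinset_card_of_nodup hnd, hfs, List.toFinset_reverse, pvWhile_toFinset]
    congr 1
    ext x
    simp [pvU]
  simp only [hlen]
  by_cases h3 : 3 ≤ n
  · rw [Finset.card_insert_of_notMem (by rw [mem_pvR]; omega)]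
    rw [pvR_eq_Icc, Int.card_Icc]
    have h4 : (n - 1 + 1 - 2).toNat = (n - 2).toNat := by omega
    rw [h4]
    omega
  · rw [pvR_eq_Icc, Finset.Icc_eq_empty (by omega)]
    simp
    omega

-- ===== VERDICT (by name: the statement is the Claim_ definition above) =====
theorem distinctIntegers_spec : Claim_equal_distinctIntegers := by
  intro n _
  unfold Spec_distinctIntegers distinctIntegers_alt
  exact distinctIntegers_closed n
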